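-- pv_equiv track=rewrite | github.com/cgrdn/blog | _posts/2023-12-05-implementing-updated-backscatter-rtqc/medsrtqc/qc/history.py | read_qc_hex
-- ===== SOURCE A (Python) =====
-- def read_qc_hex(hex_code):
--     if len(hex_code.strip()) == 0: # pragma: no cover
--         hex_code = hex(0)
--     num = int(hex_code, 16)
--     # list to save test number in
--     tests = []
--     for i in range(63, 56, -1):
--         qc_binary_id = 2**i
--         if qc_binary_id <= num:
--             num -= qc_binary_id
--             tests.append(i)
--
--     for i in range(26, 0, -1):
--         qc_binary_id = 2**i
--         if qc_binary_id <= num: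
--             num -= qc_binary_id
--             tests.append(i)
--
--     if num != 0: # pragma: no cover
--         raise ValueError('Invalid input, decoding QC tests left a non-zero remainder')
--
--     return tests[::-1]
-- ===== SOURCE B (Python) =====
-- def read_qc_hex(hex_code):
--     if len(hex_code.strip()) == 0:
--         hex_code = hex(0)
--     num = int(hex_code, 16)
--     # mask of the legal QC-test bit positions: 57..63 and 1..26
--     mask = sum(1 << i for i in range(57, 64)) | sum(1 << i for i in range(1, 27))
--     if (num | mask) != mask:
--         raise ValueError('Invalid input, decoding QC tests left a non-zero remainder')
--     return [i for i in range(64) if num & (1 << i)]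
-- ===== Notes on version B (the rewrite author's own statement) =====
-- stated objective: simpler
-- what changed: A decodes by greedily subtracting powers of two in two descending loops, accumulating test numbers and checking the leftover remainder; B validates once against a precomputed bit mask of the legal positions and returns the set bit positions with a single ascending scan (no subtraction, no final reverse).
import Mathlib
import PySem

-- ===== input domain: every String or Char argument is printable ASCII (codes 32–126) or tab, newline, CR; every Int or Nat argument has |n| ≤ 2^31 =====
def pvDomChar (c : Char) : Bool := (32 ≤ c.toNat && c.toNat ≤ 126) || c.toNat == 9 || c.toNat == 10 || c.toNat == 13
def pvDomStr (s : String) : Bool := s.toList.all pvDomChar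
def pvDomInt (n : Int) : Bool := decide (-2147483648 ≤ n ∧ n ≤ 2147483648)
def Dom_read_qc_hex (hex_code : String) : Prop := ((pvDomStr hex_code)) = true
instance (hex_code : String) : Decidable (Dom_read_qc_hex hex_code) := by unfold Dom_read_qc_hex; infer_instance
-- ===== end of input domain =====

-- B replaces A's two greedy power-of-two subtraction loops (and their accumulated-remainder
-- check) by a single mask-membership validation plus one ascending bit scan (objective: simpler).

-- ===== PORT A =====
def read_qc_hex (hex_code : String) : List Int :=
  let hex_code := if PySem.Str.len (PySem.Str.strip hex_code) = 0 then "0x0" else hex_code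
  match PySem.Int.ofStrBase? hex_code 16 with
  | none => []  -- int(hex_code, 16) raises ValueError here; outside Pre_
  | some num0 =>
    let st := (PySem.List.pyRange 63 56 (-1)).foldl
      (fun (st : Int × List Int) (i : Int) =>
        let qc : Int := 2 ^ i.toNat  -- 2**i, exact since every i of this range is nonnegative
        if qc ≤ st.1 then (st.1 - qc, st.2 ++ [i]) else st) (num0, [])
    let st := (PySem.List.pyRange 26 0 (-1)).foldl
      (fun (st : Int × List Int) (i : Int) =>
        let qc : Int := 2 ^ i.toNat
        if qc ≤ st.1 then (st.1 - qc, st.2 ++ [i]) else st) st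
    if st.1 ≠ 0 then []  -- raise ValueError; outside Pre_
    else st.2.reverse    -- tests[::-1]  (PySem.List.slice?_none_none_neg_one)

-- ===== PORT B =====
def read_qc_hex_alt (hex_code : String) : List Int :=
  let hex_code := if PySem.Str.len (PySem.Str.strip hex_code) = 0 then "0x0" else hex_code
  match PySem.Int.ofStrBase? hex_code 16 with
  | none => []  -- int(hex_code, 16) raises ValueError here; outside Pre_
  | some num =>
    let mask : Int :=
      PySem.Int.bor (((PySem.List.pyRange 57 64 1).map (fun i => (1:Int) <<< i.toNat)).sum)
                    (((PySem.List.pyRange 1 27 1).map (fun i => (1:Int) <<< i.toNat)).sum)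
    if PySem.Int.bor num mask ≠ mask then []  -- raise ValueError; outside Pre_
    else (PySem.List.pyRange 0 64 1).filter
      (fun i => decide (PySem.Int.band num ((1:Int) <<< i.toNat) ≠ 0))

-- ===== PRECONDITION & SPEC =====
def pvQcMask : Nat := 0xFE00000007FFFFFE  -- bits 57..63 and 1..26 set

-- Pre_ = exactly the inputs on which Python A returns: the (guarded) string parses as a base-16
-- integer (else int() raises ValueError) that is nonnegative with all set bits among the legal
-- QC positions 1..26 and 57..63 (else A's leftover remainder is nonzero and it raises ValueError).
def Pre_read_qc_hex (hex_code : String) : Prop :=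
  (match PySem.Int.ofStrBase? (if PySem.Str.len (PySem.Str.strip hex_code) = 0 then "0x0" else hex_code) 16 with
   | none => false
   | some n => decide (0 ≤ n) && (n.toNat &&& pvQcMask == n.toNat)) = true

instance (hex_code : String) : Decidable (Pre_read_qc_hex hex_code) := by
  unfold Pre_read_qc_hex; infer_instance

def pvWitness_read_qc_hex : String := "1e"

def Spec_read_qc_hex (hex_code : String) (out : List Int) : Prop := out = read_qc_hex_alt hex_code
instance (hex_code : String) (out : List Int) : Decidable (Spec_read_qc_hex hex_code out) := by unfold Spec_read_qc_hex; infer_instance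

-- ===== CLAIM (what is proved, stated in full; the proofs are below) =====
def Claim_equal_read_qc_hex : Prop := ∀ (hex_code : String), Dom_read_qc_hex hex_code → Pre_read_qc_hex hex_code → Spec_read_qc_hex hex_code (read_qc_hex hex_code)

-- ===== LEMMAS AND PROOFS =====

-- A's greedy subtraction loop, restated over Nat.
def pvGreedy : List Nat → Nat → Nat × List Nat
  | [], n => (n, [])
  | i :: rest, n =>
    if 2 ^ i ≤ n then
      let r := pvGreedy rest (n - 2 ^ i)
      (r.1, i :: r.2)
    else pvGreedy rest n

theorem pvGreedy_nil (n : Nat) : pvGreedy [] n = (n, []) := rfl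
theorem pvGreedy_cons (i : Nat) (rest : List Nat) (n : Nat) :
    pvGreedy (i :: rest) n =
      if 2 ^ i ≤ n then ((pvGreedy rest (n - 2 ^ i)).1, i :: (pvGreedy rest (n - 2 ^ i)).2)
      else pvGreedy rest n := rfl

-- A's Int fold over casted bit positions is pvGreedy.
theorem pvBridge (l : List Nat) : ∀ (m : Nat) (acc : List Int),
    (l.map (fun k => Int.ofNat k)).foldl
      (fun (st : Int × List Int) (i : Int) =>
        let qc : Int := 2 ^ i.toNat
        if qc ≤ st.1 then (st.1 - qc, st.2 ++ [i]) else st) ((m:Int), acc)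
    = (((pvGreedy l m).1 : Int), acc ++ (pvGreedy l m).2.map (fun k => Int.ofNat k)) := by
  induction l with
  | nil => intro m acc; rw [pvGreedy_nil]; simp
  | cons i rest ih =>
    intro m acc
    rw [List.map_cons, List.foldl_cons, pvGreedy_cons]
    by_cases h : 2 ^ i ≤ m
    · rw [if_pos h]
      show (rest.map (fun k => Int.ofNat k)).foldl _
        (if (2:Int) ^ i ≤ (m:Int) then ((m:Int) - 2 ^ i, acc ++ [Int.ofNat i]) else ((m:Int), acc)) = _
      rw [if_pos (show (2:Int) ^ i ≤ (m:Int) by exact_mod_cast h),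
          show (m:Int) - 2 ^ i = ((m - 2^i : Nat) : Int) from by push_cast [h]; ring, ih]
      simp
    · rw [if_neg h]
      show (rest.map (fun k => Int.ofNat k)).foldl _
        (if (2:Int) ^ i ≤ (m:Int) then ((m:Int) - 2 ^ i, acc ++ [Int.ofNat i]) else ((m:Int), acc)) = _
      rw [if_neg (show ¬ (2:Int) ^ i ≤ (m:Int) by exact_mod_cast h), ih]

-- Greedy subtraction down a descending run of bit positions extracts exactly the set bits
-- (descending) and leaves the value modulo the lowest visited power.
theorem pvGreedy_eq (k : Nat) : ∀ (lo m : Nat), m < 2^(lo+k) →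
    pvGreedy ((List.range' lo k).reverse) m
    = (m % 2^lo, ((List.range' lo k).filter (fun j => m.testBit j)).reverse) := by
  induction k with
  | zero =>
    intro lo m hm
    simp [pvGreedy_nil, Nat.mod_eq_of_lt (by simpa using hm)]
  | succ k ih =>
    intro lo m hm
    have e : 2 ^ (lo + (k+1)) = 2 ^ (lo+k) * 2 := pow_succ 2 (lo+k)
    have h2 : m < 2 ^ (lo+k) * 2 := by rw [← e]; exact hm
    rw [List.range'_1_concat, List.reverse_append, List.reverse_singleton, List.singleton_append,
        pvGreedy_cons]
    by_cases h : 2 ^ (lo + k) ≤ m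
    · rw [if_pos h]
      have hmlt : m - 2 ^ (lo+k) < 2 ^ (lo+k) := by omega
      have hsub : m - 2 ^ (lo+k) = m % 2 ^ (lo+k) := by
        rw [Nat.mod_eq_sub_mod h, Nat.mod_eq_of_lt hmlt]
      rw [ih lo (m - 2^(lo+k)) hmlt]
      have htb : m.testBit (lo+k) = true := by
        rw [Nat.testBit_eq_decide_div_mod_eq]
        have hd : m / 2^(lo+k) = 1 := Nat.div_eq_of_lt_le (by simpa using h) (by have := h2; omega)
        simp [hd]
      have hfc : (List.range' lo k).filter (fun j => (m - 2^(lo+k)).testBit j)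
               = (List.range' lo k).filter (fun j => m.testBit j) := by
        apply List.filter_congr
        intro j hj
        have hjlt : j < lo + k := by
          rcases List.mem_range'_1.mp hj with ⟨h1, h2⟩; omega
        rw [hsub, Nat.testBit_mod_two_pow]
        simp [hjlt]
      have hmod : (m - 2^(lo+k)) % 2^lo = m % 2^lo := by
        obtain ⟨c, hc⟩ : 2^lo ∣ 2^(lo+k) := pow_dvd_pow 2 (by omega)
        have hme : m = (m - 2^(lo+k)) + 2^lo * c := by omega
        conv_rhs => rw [hme]
        rw [Nat.add_mul_mod_self_left]
      rw [hfc, hmod]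
      simp [List.filter_append, htb]
    · rw [if_neg h]
      have htb : m.testBit (lo+k) = false := Nat.testBit_lt_two_pow (by omega)
      rw [ih lo m (by omega)]
      simp [List.filter_append, htb]

theorem pvRangeA1 : PySem.List.pyRange 63 56 (-1) = ((List.range' 57 7).reverse).map (fun k => Int.ofNat k) := by decide
theorem pvRangeA2 : PySem.List.pyRange 26 0 (-1) = ((List.range' 1 26).reverse).map (fun k => Int.ofNat k) := by decide
theorem pvRangeB : PySem.List.pyRange 0 64 1 = (List.range' 0 64).map (fun k => Int.ofNat k) := by decide
theorem pvRangeSplit : List.range' 0 64 = List.range' 0 1 ++ List.range' 1 26 ++ List.range' 27 30 ++ List.range' 57 7 := by decide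

theorem pvMaskVal :
    PySem.Int.bor (((PySem.List.pyRange 57 64 1).map (fun i => (1:Int) <<< i.toNat)).sum)
                  (((PySem.List.pyRange 1 27 1).map (fun i => (1:Int) <<< i.toNat)).sum)
    = ((pvQcMask : Nat) : Int) := by decide

theorem pvMaskBit_mid (j : Nat) (h1 : 27 ≤ j) (h2 : j < 57) : pvQcMask.testBit j = false := by
  interval_cases j <;> decide

theorem pvBitsSub {m : Nat} (hm : m &&& pvQcMask = m) :
    ∀ j, m.testBit j = true → pvQcMask.testBit j = true := by
  intro j hj
  have := congrArg (fun x => x.testBit j) hm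
  simp only [Nat.testBit_and, hj, Bool.true_and] at this
  exact this

theorem pvOrEq {m : Nat} (hm : m &&& pvQcMask = m) : m ||| pvQcMask = pvQcMask := by
  apply Nat.eq_of_testBit_eq
  intro j
  simp only [Nat.testBit_or]
  cases hj : m.testBit j with
  | false => simp
  | true => simp [pvBitsSub hm j hj]

-- ===== VERDICT (by name: the statement is the Claim_ definition above) =====
theorem read_qc_hex_spec : Claim_equal_read_qc_hex := by
  intro s hdom hpre
  unfold Pre_read_qc_hex at hpre
  unfold Spec_read_qc_hex read_qc_hex read_qc_hex_alt
  cases hp : PySem.Int.ofStrBase? (if PySem.Str.len (PySem.Str.strip s) = 0 then "0x0" else s) 16 with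
  | none => rw [hp] at hpre; simp at hpre
  | some num =>
    rw [hp] at hpre
    simp only [Bool.and_eq_true, decide_eq_true_eq, beq_iff_eq] at hpre
    obtain ⟨hnn, hmask⟩ := hpre
    obtain ⟨m, rfl⟩ : ∃ m : Nat, num = (m : Int) := ⟨num.toNat, (Int.toNat_of_nonneg hnn).symm⟩
    rw [Int.toNat_natCast] at hmask
    -- basic bit facts about m
    have hle : m ≤ pvQcMask := hmask ▸ Nat.and_le_right
    have hm64 : m < 2^(57+7) := by
      have : pvQcMask < 2^(57+7) := by norm_num [pvQcMask]
      omega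
    have hmid : ∀ j, 27 ≤ j → j < 57 → m.testBit j = false := by
      intro j h1 h2
      cases hc : m.testBit j with
      | false => rfl
      | true => exact absurd (pvBitsSub hmask j hc) (by simp [pvMaskBit_mid j h1 h2])
    have hbit0 : m.testBit 0 = false := by
      cases hc : m.testBit 0 with
      | false => rfl
      | true => exact absurd (pvBitsSub hmask 0 hc) (by decide)
    have hmod5727 : m % 2^57 = m % 2^27 := by
      apply Nat.eq_of_testBit_eq
      intro j
      rw [Nat.testBit_mod_two_pow, Nat.testBit_mod_two_pow]
      by_cases hj1 : j < 27
      · simp [hj1, (show j < 57 by omega)]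
      · by_cases hj2 : j < 57
        · simp [hj1, hj2, hmid j (by omega) hj2]
        · simp [hj1, hj2]
    have hlt27 : m % 2^57 < 2^(1+26) := by
      rw [hmod5727]
      exact lt_of_lt_of_le (Nat.mod_lt m (by positivity)) (by norm_num)
    have hm2 : m % 2 = 0 := by
      have hb0 := hbit0
      rw [Nat.testBit_eq_decide_div_mod_eq] at hb0
      simp at hb0
      omega
    have hrem : (m % 2^57) % 2^1 = 0 := by
      rw [hmod5727, pow_one, Nat.mod_mod_of_dvd m (by norm_num : (2:Nat) ∣ 2^27), hm2]
    -- evaluate A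
    simp only [hp]
    rw [pvRangeA1, pvBridge, pvGreedy_eq 7 57 m hm64, pvRangeA2]
    simp only [List.nil_append]
    rw [pvBridge, pvGreedy_eq 26 1 (m % 2^57) hlt27, hrem]
    -- evaluate B
    rw [pvMaskVal]
    have hB : ¬ (PySem.Int.bor ((m:Int)) (((pvQcMask:Nat):Int)) ≠ (((pvQcMask:Nat):Int))) := by
      rw [PySem.Int.bor_natCast, pvOrEq hmask]
      simp
    rw [if_neg hB, pvRangeB, List.filter_map]
    -- A's raise-check is passed: the remainder is 0
    rw [if_neg (by simp)]
    have hpred : ∀ k ∈ List.range' 0 64,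
        ((fun (i : Int) => decide (PySem.Int.band ((m:Int)) ((1:Int) <<< i.toNat) ≠ 0)) ∘ (fun k => Int.ofNat k)) k
        = m.testBit k := by
      intro k _
      simp only [Function.comp_apply]
      rw [show (Int.ofNat k).toNat = k from rfl, Int.shiftLeft_eq,
          show (1:Int) * 2^k = ((2^k : Nat) : Int) from by push_cast; ring,
          PySem.Int.band_natCast, Nat.and_two_pow]
      cases htb : m.testBit k with
      | true => simp
      | false => simp
    rw [List.filter_congr hpred]
    -- compare the two filtered lists
    have hfc2 : (List.range' 1 26).filter (fun j => (m % 2^57).testBit j)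
              = (List.range' 1 26).filter (fun j => m.testBit j) := by
      apply List.filter_congr
      intro j hj
      rcases List.mem_range'_1.mp hj with ⟨hj1, hj2⟩
      rw [Nat.testBit_mod_two_pow]
      simp [(show j < 57 by omega)]
    have hmids : (List.range' 27 30).filter (fun j => m.testBit j) = [] := by
      rw [List.filter_eq_nil_iff]
      intro j hj
      rcases List.mem_range'_1.mp hj with ⟨hj1, hj2⟩
      simp [hmid j (by omega) (by omega)]
    rw [hfc2]
    conv_rhs => rw [pvRangeSplit]
    simp [List.filter_append, hmids, hbit0, List.reverse_append]
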